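-- pv_equiv track=rewrite | github.com/Monatyr/aoc_2023 | day11/sol.py | get_in_between
-- ===== SOURCE A (Python) =====
-- def get_in_between(pos1: tuple[int, int], pos2: tuple[int, int], rows: list[int], cols: list[int]):
--     count = 0
--     for i in range(min(pos1[0], pos2[0]), max(pos1[0], pos2[0]) + 1):
--         if i in rows:
--             count += 1
--     for i in range(min(pos1[1], pos2[1]), max(pos1[1], pos2[1]) + 1):
--         if i in cols:
--             count += 1
--     return count
-- ===== SOURCE B (Python) =====
-- def get_in_between(pos1, pos2, rows, cols):
--     def count_in(lo, hi, vals):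
--         return sum(1 for v in set(vals) if lo <= v <= hi)
--     return (count_in(min(pos1[0], pos2[0]), max(pos1[0], pos2[0]), rows)
--             + count_in(min(pos1[1], pos2[1]), max(pos1[1], pos2[1]), cols))
-- ===== Notes on version B (the rewrite author's own statement) =====
-- stated objective: faster
-- what changed: Instead of iterating over every integer of the coordinate range and scanning rows/cols for membership, B makes one pass over the distinct elements of rows and cols and counts those lying inside the range.
import Mathlib
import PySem

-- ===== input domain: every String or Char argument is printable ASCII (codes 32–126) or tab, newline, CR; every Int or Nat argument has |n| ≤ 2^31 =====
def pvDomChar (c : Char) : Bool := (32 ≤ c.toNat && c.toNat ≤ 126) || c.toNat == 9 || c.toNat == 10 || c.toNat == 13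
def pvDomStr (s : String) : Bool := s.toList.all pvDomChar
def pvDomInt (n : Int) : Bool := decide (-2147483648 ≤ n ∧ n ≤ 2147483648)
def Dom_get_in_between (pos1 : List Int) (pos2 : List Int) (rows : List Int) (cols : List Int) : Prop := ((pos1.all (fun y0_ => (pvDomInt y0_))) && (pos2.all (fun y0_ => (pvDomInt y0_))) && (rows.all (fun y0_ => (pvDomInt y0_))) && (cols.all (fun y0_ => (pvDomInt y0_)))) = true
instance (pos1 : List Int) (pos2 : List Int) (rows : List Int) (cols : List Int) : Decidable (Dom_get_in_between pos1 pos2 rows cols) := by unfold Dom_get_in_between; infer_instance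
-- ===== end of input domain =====

-- B replaces A's scan over every integer in the coordinate span (with a membership scan per
-- integer) by a single pass over the distinct elements of rows/cols, counting those in range:
-- asymptotically faster when the span is large.


-- ===== PORT A =====
-- literal transliteration: two range loops, each testing membership in the list
def get_in_between (pos1 : List Int) (pos2 : List Int) (rows : List Int) (cols : List Int) : Int :=
  let r1 := PySem.List.pyGetD pos1 0 0   -- exact under Pre_ (index in range)
  let r2 := PySem.List.pyGetD pos2 0 0
  let c1 := PySem.List.pyGetD pos1 1 0
  let c2 := PySem.List.pyGetD pos2 1 0
  let count : Int := 0
  let count := (PySem.List.pyRange (min r1 r2) (max r1 r2 + 1) 1).foldl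
    (fun c i => if rows.contains i then c + 1 else c) count
  let count := (PySem.List.pyRange (min c1 c2) (max c1 c2 + 1) 1).foldl
    (fun c i => if cols.contains i then c + 1 else c) count
  count

-- ===== PORT B =====
-- one pass over the distinct elements (set(vals)), counting those inside [lo, hi]
def countInAlt (lo hi : Int) (vals : List Int) : Int :=
  ((PySem.Set.ofList vals).countP (fun v => decide (lo ≤ v) && decide (v ≤ hi)) : Int)

def get_in_between_alt (pos1 : List Int) (pos2 : List Int) (rows : List Int) (cols : List Int) : Int :=
  let r1 := PySem.List.pyGetD pos1 0 0
  let r2 := PySem.List.pyGetD pos2 0 0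
  let c1 := PySem.List.pyGetD pos1 1 0
  let c2 := PySem.List.pyGetD pos2 1 0
  countInAlt (min r1 r2) (max r1 r2) rows + countInAlt (min c1 c2) (max c1 c2) cols

-- ===== PRECONDITION & SPEC =====
-- Pre_ excludes only inputs where A raises IndexError (pos1/pos2 shorter than 2 elements)
def Pre_get_in_between (pos1 : List Int) (pos2 : List Int) (rows : List Int) (cols : List Int) : Prop :=
  2 ≤ pos1.length ∧ 2 ≤ pos2.length
instance (pos1 : List Int) (pos2 : List Int) (rows : List Int) (cols : List Int) : Decidable (Pre_get_in_between pos1 pos2 rows cols) := by unfold Pre_get_in_between; infer_instance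

def pvWitness_get_in_between : List Int × List Int × List Int × List Int :=
  ([1, 2], [4, 0], [2, 3, 3], [1, 5])

def Spec_get_in_between (pos1 : List Int) (pos2 : List Int) (rows : List Int) (cols : List Int) (out : Int) : Prop := out = get_in_between_alt pos1 pos2 rows cols
instance (pos1 : List Int) (pos2 : List Int) (rows : List Int) (cols : List Int) (out : Int) : Decidable (Spec_get_in_between pos1 pos2 rows cols out) := by unfold Spec_get_in_between; infer_instance

-- ===== CLAIM (what is proved, stated in full; the proofs are below) =====
def Claim_equal_get_in_between : Prop := ∀ (pos1 : List Int) (pos2 : List Int) (rows : List Int) (cols : List Int), Dom_get_in_between pos1 pos2 rows cols → Pre_get_in_between pos1 pos2 rows cols → Spec_get_in_between pos1 pos2 rows cols (get_in_between pos1 pos2 rows cols)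

-- ===== LEMMAS AND PROOFS =====

theorem foldl_count_if {α : Type} (p : α → Bool) (l : List α) (init : Int) :
    l.foldl (fun c i => if p i then c + 1 else c) init = init + (l.countP p : Int) := by
  induction l generalizing init with
  | nil => simp
  | cons x xs ih =>
    simp only [List.foldl_cons, List.countP_cons]
    by_cases h : p x = true
    · rw [if_pos h, ih]; simp [h]; ring
    · rw [if_neg h, ih]; simp [h]

theorem count_sides_eq (lo hi : Int) (vals : List Int) :
    ((PySem.List.pyRange lo (hi + 1) 1).countP (fun i => vals.contains i) : Int)
      = countInAlt lo hi vals := by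
  unfold countInAlt
  rw [List.countP_eq_length_filter, List.countP_eq_length_filter]
  congr 1
  apply List.Perm.length_eq
  rw [List.perm_ext_iff_of_nodup]
  · intro x
    simp only [List.mem_filter, PySem.List.mem_pyRange_one, PySem.Set.mem_ofList,
      List.contains_iff_mem, decide_eq_true_eq, Bool.and_eq_true]
    constructor
    · rintro ⟨⟨h1, h2⟩, h3⟩; exact ⟨h3, h1, by omega⟩
    · rintro ⟨h3, h1, h2⟩; exact ⟨⟨h1, by omega⟩, h3⟩
  · exact (PySem.List.nodup_pyRange_one lo (hi + 1)).filter _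
  · exact (PySem.Set.nodup_ofList vals).filter _

theorem get_in_between_spec : Claim_equal_get_in_between := by
  intro pos1 pos2 rows cols _ _
  unfold Spec_get_in_between get_in_between get_in_between_alt
  simp only []
  rw [foldl_count_if, foldl_count_if]
  rw [count_sides_eq, count_sides_eq]
  ring
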